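-- pv_equiv track=rewrite | github.com/bluewonder2000/screentime-tracker | weekly_formatter.py | _build_peak_windows
-- ===== SOURCE A (Python) =====
-- def _build_peak_windows(deep_work_by_hour):
--     """Group consecutive hours of deep work into multi-hour windows.
--     Handles midnight wraparound (e.g., hours 22,23,0,1 -> one window 10pm-2am).
--     """
--     if not deep_work_by_hour:
--         return []
--     hours_sorted = sorted(deep_work_by_hour.keys())
--     windows = []
--     current_start = hours_sorted[0]
--     current_end = hours_sorted[0]
--     current_total = deep_work_by_hour[current_start]
--     for hour in hours_sorted[1:]:
--         if hour == current_end + 1: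
--             current_end = hour
--             current_total += deep_work_by_hour[hour]
--         else:
--             windows.append({"start_hour": current_start, "end_hour": (current_end + 1) % 24, "total_minutes": current_total})
--             current_start = hour
--             current_end = hour
--             current_total = deep_work_by_hour[hour]
--     windows.append({"start_hour": current_start, "end_hour": (current_end + 1) % 24, "total_minutes": current_total})
--     # Merge first and last windows if they wrap around midnight
--     if len(windows) >= 2 and windows[-1]["end_hour"] == windows[0]["start_hour"]:
--         merged = {"start_hour": windows[-1]["start_hour"], "end_hour": windows[0]["end_hour"], "total_minutes": windows[-1]["total_minutes"] + windows[0]["total_minutes"]}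
--         windows = [merged] + windows[1:-1]
--     windows.sort(key=lambda w: w["total_minutes"], reverse=True)
--     return windows
-- ===== SOURCE B (Python) =====
-- def _build_peak_windows(deep_work_by_hour):
--     """Group consecutive deep-work hours into windows, sorted by minutes (desc).
--
--     Different algorithm: instead of scanning the sorted hours sequentially with
--     running (start, end, total) state, detect run STARTS by set membership
--     (h is a start iff h-1 is not a key) and walk each run forward with
--     membership tests -- the classic hash-set consecutive-sequence technique.
--     """
--     if not deep_work_by_hour:
--         return []
--     keys = set(deep_work_by_hour)
--     windows = []
--     for s in sorted(h for h in keys if h - 1 not in keys):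
--         e = s
--         total = deep_work_by_hour[s]
--         while e + 1 in keys:
--             e += 1
--             total += deep_work_by_hour[e]
--         windows.append({"start_hour": s, "end_hour": (e + 1) % 24, "total_minutes": total})
--     if len(windows) >= 2 and windows[-1]["end_hour"] == windows[0]["start_hour"]:
--         merged = {"start_hour": windows[-1]["start_hour"], "end_hour": windows[0]["end_hour"], "total_minutes": windows[-1]["total_minutes"] + windows[0]["total_minutes"]}
--         windows = [merged] + windows[1:-1]
--     windows.sort(key=lambda w: w["total_minutes"], reverse=True)
--     return windows
-- ===== Notes on version B (the rewrite author's own statement) =====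
-- stated objective: alternative
-- what changed: B abandons A's sequential scan of the sorted hours with running (start, end, total) state: it builds a hash set of the keys, identifies run starts directly as hours h with h-1 not in the set, and expands each run forward by membership tests (the classic hash-set consecutive-sequence technique), keeping the same midnight merge and stable descending sort.
import Mathlib
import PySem

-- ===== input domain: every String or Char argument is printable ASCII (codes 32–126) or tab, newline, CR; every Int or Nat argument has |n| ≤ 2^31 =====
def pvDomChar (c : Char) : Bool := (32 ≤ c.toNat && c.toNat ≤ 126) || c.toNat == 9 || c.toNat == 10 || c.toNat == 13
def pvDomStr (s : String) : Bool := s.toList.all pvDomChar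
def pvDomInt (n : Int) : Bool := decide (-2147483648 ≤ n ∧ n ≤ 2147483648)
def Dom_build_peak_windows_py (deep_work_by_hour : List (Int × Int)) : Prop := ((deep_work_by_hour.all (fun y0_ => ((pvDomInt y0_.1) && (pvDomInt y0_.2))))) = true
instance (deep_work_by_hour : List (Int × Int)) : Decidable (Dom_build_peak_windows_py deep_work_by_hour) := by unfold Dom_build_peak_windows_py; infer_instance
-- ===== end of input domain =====

-- B replaces A's sequential scan of the sorted hours (running start/end/total
-- state machine) by the hash-set consecutive-sequence technique: an hour h is a
-- run START iff h-1 is not a key, and each run is expanded forward by set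
-- membership tests; the midnight merge and the stable descending sort are the
-- textually identical tail of both Pythons (objective: alternative algorithm).
-- The dict argument arrives as an association list; both ports decode it with
-- PySem.Dict.ofList (Python dict construction: last value wins, first position).

-- ===== PORT A =====

-- {"start_hour": cs, "end_hour": (ce + 1) % 24, "total_minutes": ct}
def mkWinA (cs ce ct : Int) : List (String × Int) :=
  [("start_hour", cs), ("end_hour", PySem.Int.mod (ce + 1) 24), ("total_minutes", ct)]

-- A's for-loop over hours_sorted[1:] with state (windows, current_start, current_end, current_total)
def aLoop (d : PySem.Dict Int Int) (ws : List (List (String × Int))) (cs ce ct : Int) :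
    List Int → List (List (String × Int))
  | [] => ws ++ [mkWinA cs ce ct]
  | h :: t =>
    if h = ce + 1 then aLoop d ws cs h (ct + d.getD h 0) t
    else aLoop d (ws ++ [mkWinA cs ce ct]) h h (d.getD h 0) t

-- w["k"]: lookup in a window dict (first match; keys are unique by construction).
-- The midnight merge and windows.sort(key=total_minutes, reverse=True) are textually
-- identical in both Pythons, so both ports share this one helper.
def wget (w : List (String × Int)) (k : String) : Int := ((w.lookup k).getD 0)

def finishWindows (ws : List (List (String × Int))) : List (List (String × Int)) :=
  let ws2 :=
    if 2 ≤ ws.length ∧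
        wget (PySem.List.pyGetD ws (-1) []) "end_hour" = wget (PySem.List.pyGetD ws 0 []) "start_hour" then
      [("start_hour", wget (PySem.List.pyGetD ws (-1) []) "start_hour"),
       ("end_hour", wget (PySem.List.pyGetD ws 0 []) "end_hour"),
       ("total_minutes", wget (PySem.List.pyGetD ws (-1) []) "total_minutes" +
                          wget (PySem.List.pyGetD ws 0 []) "total_minutes")]
        :: PySem.List.slice ws (some 1) (some (-1))
    else ws
  PySem.List.sorted ws2 (fun w => wget w "total_minutes") true

def build_peak_windows_py (deep_work_by_hour : List (Int × Int)) : List (List (String × Int)) :=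
  -- the [] branch is A's empty-dict early return (sorted keys are empty iff the dict is)
  match PySem.List.sorted (PySem.Dict.ofList deep_work_by_hour).keys (fun x => x) false with
  | [] => []
  | h0 :: rest =>
    finishWindows (aLoop (PySem.Dict.ofList deep_work_by_hour) [] h0 h0
      ((PySem.Dict.ofList deep_work_by_hour).getD h0 0) rest)

-- ===== PORT B =====

-- "e = s; while e + 1 in keys: e += 1; total += d[e]"; the Nat argument is a
-- totality fuel (the set size, an upper bound on any run length — proved below)
def walk (mem : Int → Bool) (d : PySem.Dict Int Int) : Nat → Int → Int → Int × Int
  | 0, e, tot => (e, tot)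
  | fuel + 1, e, tot =>
    if mem (e + 1) then walk mem d fuel (e + 1) (tot + d.getD (e + 1) 0) else (e, tot)

def build_peak_windows_py_alt (deep_work_by_hour : List (Int × Int)) : List (List (String × Int)) :=
  if (PySem.Dict.ofList deep_work_by_hour).keys = [] then []  -- the empty-dict early return
  else
    let d := PySem.Dict.ofList deep_work_by_hour
    let ks : PySem.Set Int := PySem.Set.ofList d.keys          -- keys = set(deep_work_by_hour)
    let mem : Int → Bool := fun x => PySem.Set.contains ks x
    -- sorted(h for h in keys if h - 1 not in keys)
    let starts := PySem.List.sorted (ks.filter (fun h => !(mem (h - 1)))) (fun x => x) false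
    finishWindows (starts.map (fun s =>
      let p := walk mem d ks.length s (d.getD s 0)
      mkWinA s p.1 p.2))

-- ===== PRECONDITION & SPEC =====
def Spec_build_peak_windows_py (deep_work_by_hour : List (Int × Int)) (out : List (List (String × Int))) : Prop := out = build_peak_windows_py_alt deep_work_by_hour
instance (deep_work_by_hour : List (Int × Int)) (out : List (List (String × Int))) : Decidable (Spec_build_peak_windows_py deep_work_by_hour out) := by unfold Spec_build_peak_windows_py; infer_instance

-- ===== CLAIM (what is proved, stated in full; the proofs are below) =====
def Claim_equal_build_peak_windows_py : Prop := ∀ (deep_work_by_hour : List (Int × Int)), Dom_build_peak_windows_py deep_work_by_hour → Spec_build_peak_windows_py deep_work_by_hour (build_peak_windows_py deep_work_by_hour)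

-- ===== LEMMAS AND PROOFS =====

-- A's loop without the accumulator
def winsA (d : PySem.Dict Int Int) (cs ce ct : Int) : List Int → List (List (String × Int))
  | [] => [mkWinA cs ce ct]
  | h :: t =>
    if h = ce + 1 then winsA d cs h (ct + d.getD h 0) t
    else mkWinA cs ce ct :: winsA d h h (d.getD h 0) t

theorem aLoop_eq (d : PySem.Dict Int Int) :
    ∀ (hs : List Int) (ws : List (List (String × Int))) (cs ce ct : Int),
      aLoop d ws cs ce ct hs = ws ++ winsA d cs ce ct hs
  | [], ws, cs, ce, ct => rfl
  | h :: t, ws, cs, ce, ct => by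
    simp only [aLoop, winsA]
    split
    · exact aLoop_eq d t ws cs h (ct + d.getD h 0)
    · rw [aLoop_eq d t (ws ++ [mkWinA cs ce ct]) h h (d.getD h 0), List.append_assoc]
      rfl

-- reference consumption of one consecutive run: (final end, final total, rest)
def cons3 (d : PySem.Dict Int Int) : Int → Int → List Int → Int × Int × List Int
  | e, tot, [] => (e, tot, [])
  | e, tot, h :: t => if h = e + 1 then cons3 d h (tot + d.getD h 0) t else (e, tot, h :: t)

theorem cons3_rest_len (d : PySem.Dict Int Int) :
    ∀ (hs : List Int) (e tot : Int), (cons3 d e tot hs).2.2.length ≤ hs.length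
  | [], e, tot => Nat.le_refl _
  | h :: t, e, tot => by
    simp only [cons3]
    split
    · exact Nat.le_succ_of_le (cons3_rest_len d t h (tot + d.getD h 0))
    · exact Nat.le_refl _

-- the windows of the remaining (post-run) suffix
def restWins (d : PySem.Dict Int Int) : List Int → List (List (String × Int))
  | [] => []
  | h :: t => winsA d h h (d.getD h 0) t

theorem winsA_cons3 (d : PySem.Dict Int Int) :
    ∀ (hs : List Int) (cs e ct : Int),
      winsA d cs e ct hs =
        mkWinA cs (cons3 d e ct hs).1 (cons3 d e ct hs).2.1 ::
          restWins d (cons3 d e ct hs).2.2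
  | [], cs, e, ct => rfl
  | h :: t, cs, e, ct => by
    simp only [winsA, cons3]
    split
    · exact winsA_cons3 d t cs h (ct + d.getD h 0)
    · rfl

-- the walk matches the reference consumption, and all invariants are preserved
theorem consume_spec (mem : Int → Bool) (S : List Int) (d : PySem.Dict Int Int)
    (hmem : ∀ x, mem x = true ↔ x ∈ S) :
    ∀ (hs : List Int) (e tot : Int) (fuel : Nat),
      hs.Pairwise (· < ·) →
      (∀ x ∈ S, x ∈ hs ↔ e < x) →
      (∀ x ∈ hs, x ∈ S) →
      hs.length ≤ fuel →
      walk mem d fuel e tot = ((cons3 d e tot hs).1, (cons3 d e tot hs).2.1)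
      ∧ ((cons3 d e tot hs).2.2).Pairwise (· < ·)
      ∧ (∀ x ∈ S, x ∈ (cons3 d e tot hs).2.2 ↔ (cons3 d e tot hs).1 < x)
      ∧ (∀ x ∈ (cons3 d e tot hs).2.2, x ∈ S)
      ∧ (e ∈ S → (cons3 d e tot hs).1 ∈ S)
      ∧ (e ∈ S → List.filter (fun h => !(mem (h - 1))) hs
            = List.filter (fun h => !(mem (h - 1))) (cons3 d e tot hs).2.2)
      ∧ (∀ h' t', (cons3 d e tot hs).2.2 = h' :: t' → (cons3 d e tot hs).1 + 1 < h') := by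
  intro hs
  induction hs with
  | nil =>
    intro e tot fuel hp h2 h3 hf
    have hne : mem (e + 1) = false := by
      by_contra hc
      have hc' : mem (e + 1) = true := by simpa using hc
      have := (h2 _ ((hmem _).mp hc')).mpr (by omega)
      simp at this
    refine ⟨?_, List.Pairwise.nil, h2, ?_, fun h => h, fun _ => rfl, ?_⟩
    · cases fuel with
      | zero => rfl
      | succ n => simp [walk, hne, cons3]
    · intro x hx; simp [cons3] at hx
    · intro h' t' h; simp [cons3] at h
  | cons h t ih =>
    intro e tot fuel hp h2 h3 hf
    have hhS : h ∈ S := h3 h (by simp)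
    by_cases hcase : h = e + 1
    · subst hcase
      cases fuel with
      | zero => simp at hf
      | succ n =>
        have hmemT : mem (e + 1) = true := (hmem _).mpr hhS
        have hp' : t.Pairwise (· < ·) := (List.pairwise_cons.mp hp).2
        have h2' : ∀ x ∈ S, x ∈ t ↔ e + 1 < x := by
          intro x hxS
          constructor
          · intro hxt; exact (List.pairwise_cons.mp hp).1 x hxt
          · intro hlt
            have hx := List.mem_cons.mp ((h2 x hxS).mpr (by omega))
            rcases hx with rfl | hxt
            · omega
            · exact hxt
        have h3' : ∀ x ∈ t, x ∈ S := fun x hx => h3 x (by simp [hx])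
        have hf' : t.length ≤ n := by simpa using hf
        obtain ⟨c1, c2, c3, c4, c5, c6, c7⟩ :=
          ih (e + 1) (tot + d.getD (e + 1) 0) n hp' h2' h3' hf'
        simp only [cons3]
        refine ⟨?_, c2, c3, c4, fun _ => c5 hhS, ?_, c7⟩
        · simp only [walk, hmemT, if_pos]; exact c1
        · intro heS
          have hmE : mem ((e + 1) - 1) = true := by
            have : (e + 1) - 1 = e := by omega
            rw [this]; exact (hmem _).mpr heS
          rw [List.filter_cons, hmE]
          simpa using c6 hhS
    · have heh : e < h := (h2 h hhS).mp (by simp)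
      have hgt : e + 1 < h := by omega
      have hne : mem (e + 1) = false := by
        by_contra hc
        have hc' : mem (e + 1) = true := by simpa using hc
        have hx := List.mem_cons.mp ((h2 _ ((hmem _).mp hc')).mpr (by omega))
        rcases hx with hx | hx
        · omega
        · have := (List.pairwise_cons.mp hp).1 _ hx; omega
      simp only [cons3, if_neg hcase]
      refine ⟨?_, hp, h2, h3, fun heS => heS, fun _ => trivial, ?_⟩
      · cases fuel with
        | zero => rfl
        | succ n => simp [walk, hne]
      · intro h' t' heq
        obtain ⟨rfl, -⟩ := List.cons.injEq .. ▸ heq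
        omega

-- main invariant: A's remaining loop = one window per remaining run start
theorem winsA_eq_map (mem : Int → Bool) (S : List Int) (d : PySem.Dict Int Int)
    (hmem : ∀ x, mem x = true ↔ x ∈ S) (fuel : Nat) :
    ∀ (n : Nat) (hs : List Int), hs.length = n → ∀ (cs e ct : Int),
      hs.Pairwise (· < ·) →
      (∀ x ∈ S, x ∈ hs ↔ e < x) →
      (∀ x ∈ hs, x ∈ S) →
      e ∈ S →
      hs.length ≤ fuel →
      winsA d cs e ct hs =
        mkWinA cs (walk mem d fuel e ct).1 (walk mem d fuel e ct).2 ::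
          (List.filter (fun h => !(mem (h - 1))) hs).map (fun s =>
            mkWinA s (walk mem d fuel s (d.getD s 0)).1 (walk mem d fuel s (d.getD s 0)).2) := by
  intro n
  induction n using Nat.strong_induction_on with
  | _ n ih =>
    intro hs hlen cs e ct hp h2 h3 heS hf
    obtain ⟨c1, c2, c3, c4, c5, c6, c7⟩ := consume_spec mem S d hmem hs e ct fuel hp h2 h3 hf
    rw [winsA_cons3, c1, c6 heS]
    cases hrest : (cons3 d e ct hs).2.2 with
    | nil => simp [restWins]
    | cons h' t' =>
      have hgt := c7 h' t' hrest
      have c2' : (h' :: t').Pairwise (· < ·) := hrest ▸ c2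
      have c3' : ∀ x ∈ S, x ∈ h' :: t' ↔ (cons3 d e ct hs).1 < x := hrest ▸ c3
      have c4' : ∀ x ∈ h' :: t', x ∈ S := hrest ▸ c4
      have hh'S : h' ∈ S := c4' h' (by simp)
      have hmf : mem (h' - 1) = false := by
        by_contra hc
        have hc' : mem (h' - 1) = true := by simpa using hc
        have hx := List.mem_cons.mp ((c3' _ ((hmem _).mp hc')).mpr (by omega))
        rcases hx with hx | hx
        · omega
        · have := (List.pairwise_cons.mp c2').1 _ hx; omega
      have hrl : (h' :: t').length ≤ hs.length := hrest ▸ cons3_rest_len d hs e ct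
      have hlt : t'.length < n := by simp at hrl; omega
      have h2' : ∀ x ∈ S, x ∈ t' ↔ h' < x := by
        intro x hxS
        constructor
        · intro hxt; exact (List.pairwise_cons.mp c2').1 x hxt
        · intro hltx
          have hx := List.mem_cons.mp ((c3' x hxS).mpr (by omega))
          rcases hx with rfl | hx
          · omega
          · exact hx
      have h3' : ∀ x ∈ t', x ∈ S := fun x hx => c4' x (by simp [hx])
      rw [List.filter_cons]
      simp only [restWins, hmf, Bool.not_false, if_pos]
      rw [List.map_cons,
        ih t'.length hlt t' rfl h' h' (d.getD h' 0) (List.pairwise_cons.mp c2').2 h2' h3' hh'S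
          (by omega)]

theorem build_peak_windows_py_eq_alt (dw : List (Int × Int)) :
    build_peak_windows_py dw = build_peak_windows_py_alt dw := by
  unfold build_peak_windows_py build_peak_windows_py_alt
  have hnd : (PySem.Dict.ofList dw).keys.Nodup := PySem.Dict.nodup_keys_ofList dw
  have hset : PySem.Set.ofList (PySem.Dict.ofList dw).keys = (PySem.Dict.ofList dw).keys :=
    PySem.Set.ofList_eq_self_of_nodup _ hnd
  cases hS : PySem.List.sorted (PySem.Dict.ofList dw).keys (fun x => x) false with
  | nil =>
    have hK : (PySem.Dict.ofList dw).keys = [] := by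
      have := PySem.List.sorted_perm (PySem.Dict.ofList dw).keys (fun x => x) false
      rw [hS] at this
      exact (List.Perm.nil_eq this).symm
    simp [hK]
  | cons h0 rest =>
    have hperm : (h0 :: rest).Perm (PySem.Dict.ofList dw).keys := by
      rw [← hS]; exact PySem.List.sorted_perm (PySem.Dict.ofList dw).keys (fun x => x) false
    have hK : ¬ (PySem.Dict.ofList dw).keys = [] := by
      intro h
      have := hperm.length_eq
      simp [h] at this
    rw [if_neg hK]
    simp only []
    -- the sorted key list is strictly increasing
    have hp : (h0 :: rest).Pairwise (· < ·) := by
      have := PySem.List.sorted_ofList_pairwise_lt (xs := (PySem.Dict.ofList dw).keys)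
      rw [hset, hS] at this
      exact this
    -- membership through the set equals membership in the sorted list
    have hmem : ∀ x, (fun x => PySem.Set.contains (PySem.Set.ofList (PySem.Dict.ofList dw).keys) x) x = true
        ↔ x ∈ h0 :: rest := by
      intro x
      rw [hset]
      constructor
      · intro hx; exact hperm.mem_iff.mpr ((PySem.Set.contains_iff ..).mp hx)
      · intro hx; exact (PySem.Set.contains_iff ..).mpr (hperm.mem_iff.mp hx)
    -- h0 is minimal, so h0 - 1 is not a key
    have hm0 : PySem.Set.contains (PySem.Set.ofList (PySem.Dict.ofList dw).keys) (h0 - 1) = false := by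
      by_contra hc
      have hc' : PySem.Set.contains (PySem.Set.ofList (PySem.Dict.ofList dw).keys) (h0 - 1) = true := by
        simpa using hc
      have hx := List.mem_cons.mp ((hmem (h0 - 1)).mp hc')
      rcases hx with hx | hx
      · omega
      · have := (List.pairwise_cons.mp hp).1 _ hx; omega
    -- sorted(filter over the set) = filter over the sorted keys
    have hstarts : PySem.List.sorted
          ((PySem.Set.ofList (PySem.Dict.ofList dw).keys).filter
            (fun h => !(PySem.Set.contains (PySem.Set.ofList (PySem.Dict.ofList dw).keys) (h - 1))))
          (fun x => x) false
        = (h0 :: rest).filter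
            (fun h => !(PySem.Set.contains (PySem.Set.ofList (PySem.Dict.ofList dw).keys) (h - 1))) := by
      apply PySem.List.sorted_eq_of_perm_of_pairwise_lt
      · rw [hset]; exact hperm.filter _
      · exact hp.filter _
    rw [hstarts, List.filter_cons]
    simp only [hm0, Bool.not_false, if_pos]
    rw [aLoop_eq, List.nil_append, List.map_cons]
    have h2 : ∀ x ∈ h0 :: rest, x ∈ rest ↔ h0 < x := by
      intro x hxS
      constructor
      · intro hxt; exact (List.pairwise_cons.mp hp).1 x hxt
      · intro hlt
        rcases List.mem_cons.mp hxS with rfl | hx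
        · omega
        · exact hx
    have h3 : ∀ x ∈ rest, x ∈ h0 :: rest := fun x hx => List.mem_cons.mpr (Or.inr hx)
    have hfl : rest.length ≤ (PySem.Set.ofList (PySem.Dict.ofList dw).keys).length := by
      rw [hset, ← hperm.length_eq]
      simp
    rw [winsA_eq_map
        (fun x => PySem.Set.contains (PySem.Set.ofList (PySem.Dict.ofList dw).keys) x)
        (h0 :: rest) (PySem.Dict.ofList dw) hmem
        (PySem.Set.ofList (PySem.Dict.ofList dw).keys).length rest.length rest rfl
        h0 h0 ((PySem.Dict.ofList dw).getD h0 0)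
        (List.pairwise_cons.mp hp).2 h2 h3 (List.mem_cons_self) hfl]

-- ===== VERDICT (by name: the statement is the Claim_ definition above) =====
theorem build_peak_windows_py_spec : Claim_equal_build_peak_windows_py := by
  intro dw _
  unfold Spec_build_peak_windows_py
  exact build_peak_windows_py_eq_alt dw
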